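-- pv_equiv track=rewrite | github.com/pjack24/metageniuses | src/metageniuses/sae/analyze.py | _has_short_repeat_unit
-- ===== SOURCE A (Python) =====
-- def _has_short_repeat_unit(kmer: str) -> bool:
--     for unit_len in (1, 2, 3):
--         if len(kmer) % unit_len != 0:
--             continue
--         unit = kmer[:unit_len]
--         if unit * (len(kmer) // unit_len) == kmer:
--             return True
--     return False
-- ===== SOURCE B (Python) =====
-- def _has_short_repeat_unit(kmer: str) -> bool:
--     # Minimal-rotation-period search via the string-doubling idiom,
--     # instead of trying each candidate unit length and rebuilding the string.
--     if not kmer: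
--         return True
--     r = (kmer + kmer).find(kmer, 1)
--     return r <= 3 and len(kmer) % r == 0
-- ===== Notes on version B (the rewrite author's own statement) =====
-- stated objective: alternative
-- what changed: Replaces A's three-candidate reconstruct-and-compare loop (build unit*(n//d) for d=1,2,3 and test equality) with a single minimal-period computation via the string-doubling idiom r=(kmer+kmer).find(kmer,1), answering r<=3 and r|n.
import Mathlib
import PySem

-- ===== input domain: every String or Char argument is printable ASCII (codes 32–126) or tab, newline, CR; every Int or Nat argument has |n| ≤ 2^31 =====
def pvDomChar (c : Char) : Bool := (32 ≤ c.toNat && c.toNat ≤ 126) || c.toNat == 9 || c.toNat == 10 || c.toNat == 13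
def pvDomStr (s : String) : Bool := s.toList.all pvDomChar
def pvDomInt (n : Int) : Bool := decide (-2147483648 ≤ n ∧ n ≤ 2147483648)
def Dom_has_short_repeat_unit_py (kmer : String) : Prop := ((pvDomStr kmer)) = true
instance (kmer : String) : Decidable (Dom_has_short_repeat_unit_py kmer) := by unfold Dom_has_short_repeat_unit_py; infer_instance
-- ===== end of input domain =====

-- ===== PORT A =====
-- B differs from A: A tries each unit length 1,2,3 rebuilding unit*(n//d); B computes the
-- minimal rotation period once via the string-doubling find and checks r <= 3 and r | n.
-- Both ports work on kmer.toList (exact: Lean's String.append/length are kernel-opaque).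

-- `unit * k` (Python string repetition)
def pvStrMul (u : List Char) : Nat → List Char
  | 0 => []
  | k + 1 => u ++ pvStrMul u k

-- the `for unit_len in (1, 2, 3)` loop with its early `return True`
-- `len(kmer) % unit_len` / `len(kmer) // unit_len`: Nat % and / are exact here (both operands ≥ 0);
-- `kmer[:unit_len]` = List.take unit_len (exact: Python slices clamp, take clamps).
def pvALoop (s : List Char) : List Nat → Bool
  | [] => false
  | u :: rest =>
    if s.length % u ≠ 0 then pvALoop s rest
    else if pvStrMul (s.take u) (s.length / u) = s then true
    else pvALoop s rest

def has_short_repeat_unit_py (kmer : String) : Bool :=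
  pvALoop kmer.toList [1, 2, 3]

-- ===== PORT B =====
def has_short_repeat_unit_py_alt (kmer : String) : Bool :=
  let s := kmer.toList
  if s.isEmpty then true          -- `if not kmer: return True`
  else
    let r := PySem.Chars.findFrom (s ++ s) s 1 none   -- (kmer + kmer).find(kmer, 1)
    decide (r ≤ 3) && (PySem.Int.mod (s.length : Int) r == 0)   -- r <= 3 and len(kmer) % r == 0

-- ===== PRECONDITION & SPEC =====
def Spec_has_short_repeat_unit_py (kmer : String) (out : Bool) : Prop := out = has_short_repeat_unit_py_alt kmer
instance (kmer : String) (out : Bool) : Decidable (Spec_has_short_repeat_unit_py kmer out) := by unfold Spec_has_short_repeat_unit_py; infer_instance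

-- ===== CLAIM (what is proved, stated in full; the proofs are below) =====
def Claim_equal_has_short_repeat_unit_py : Prop := ∀ (kmer : String), Dom_has_short_repeat_unit_py kmer → Spec_has_short_repeat_unit_py kmer (has_short_repeat_unit_py kmer)

-- ===== LEMMAS AND PROOFS =====

-- rotation of a list by d positions
def pvRot (d : Nat) (s : List Char) : List Char := s.drop d ++ s.take d

theorem pvStrMul_comm (u : List Char) (k : Nat) : pvStrMul u k ++ u = u ++ pvStrMul u k := by
  induction k with
  | zero => simp [pvStrMul]
  | succ k ih => simp [pvStrMul]; simpa using ih

theorem pvStrMul_nil (k : Nat) : pvStrMul [] k = [] := by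
  induction k with
  | zero => rfl
  | succ k ih => simpa [pvStrMul] using ih

-- u ++ v = v ++ u and |v| = k|u|  ⇒  v = u^k
theorem pvPow_of_comm (u : List Char) (k : Nat) : ∀ v : List Char,
    u ++ v = v ++ u → v.length = k * u.length → v = pvStrMul u k := by
  induction k with
  | zero => intro v _ hl; simp at hl; simp [pvStrMul, hl]
  | succ k ih =>
    intro v hc hl
    by_cases hu : u = []
    · subst hu; simp at hl; simp [hl, pvStrMul_nil]
    · have hul : 0 < u.length := List.length_pos_iff.mpr hu
      have hle : u.length ≤ v.length := by rw [hl]; nlinarith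
      have hpre : v.take u.length = u := by
        have := congrArg (List.take u.length) hc
        rw [List.take_append_of_le_length (le_refl _), List.take_append_of_le_length hle] at this
        simp at this; exact this.symm
      set w := v.drop u.length with hw
      have hv : v = u ++ w := by rw [← hpre, hw, List.take_append_drop]
      have hcw : u ++ w = w ++ u := by
        have : u ++ (u ++ w) = (u ++ w) ++ u := by rw [← hv]; exact hc
        simpa [List.append_assoc] using this
      have hlw : w.length = k * u.length := by
        have : w.length = v.length - u.length := by rw [hw]; simp
        rw [this, hl]; ring_nf; omega
      have := ih w hcw hlw
      rw [hv, this]; rfl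

-- d | n, rotation by d fixes s  ⇒  s is (take d s) repeated n/d times
theorem pvRep_of_rot (s : List Char) (d : Nat) (hd : 0 < d) (hdvd : d ∣ s.length)
    (hn : 0 < s.length) (hrot : pvRot d s = s) :
    pvStrMul (s.take d) (s.length / d) = s := by
  have hdn : d ≤ s.length := Nat.le_of_dvd hn hdvd
  have hul : (s.take d).length = d := by simp; omega
  have hs' : s.take d ++ s.drop d = s := List.take_append_drop d s
  have hrot' : s.drop d ++ s.take d = s := hrot
  have hc : s.take d ++ s.drop d = s.drop d ++ s.take d := by rw [hs', hrot']
  have hq : 0 < s.length / d := Nat.div_pos hdn hd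
  have hnd : s.length = s.length / d * d := (Nat.div_mul_cancel hdvd).symm
  have hvl : (s.drop d).length = (s.length / d - 1) * (s.take d).length := by
    rw [hul, Nat.sub_one_mul]
    simp
    omega
  have hpow := pvPow_of_comm (s.take d) (s.length / d - 1) (s.drop d) hc hvl
  calc pvStrMul (s.take d) (s.length / d)
      = pvStrMul (s.take d) ((s.length / d - 1) + 1) := by rw [Nat.sub_add_cancel hq]
    _ = s.take d ++ pvStrMul (s.take d) (s.length / d - 1) := rfl
    _ = s.take d ++ s.drop d := by rw [← hpow]
    _ = s := hs'

-- s = u^k, |u| = d, k > 0  ⇒  rotation by d fixes s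
theorem pvRot_of_rep (s u : List Char) (d k : Nat) (hs : s = pvStrMul u k)
    (hu : u.length = d) (hk : 0 < k) : pvRot d s = s := by
  obtain ⟨k', rfl⟩ : ∃ k', k = k' + 1 := ⟨k - 1, (Nat.succ_pred_eq_of_pos hk).symm⟩
  subst hs
  unfold pvRot
  have h1 : pvStrMul u (k' + 1) = u ++ pvStrMul u k' := rfl
  rw [h1, List.take_left' hu, List.drop_left' hu, pvStrMul_comm]

-- composing rotations (no wrap-around needed)
theorem pvRot_rot (s : List Char) (a b : Nat) (h : a + b ≤ s.length) :
    pvRot a (pvRot b s) = pvRot (a + b) s := by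
  unfold pvRot
  have ha : a ≤ (s.drop b).length := by simp; omega
  rw [List.drop_append_of_le_length ha, List.take_append_of_le_length ha,
      List.drop_drop, add_comm a b, List.take_add, List.append_assoc]

-- a prefix occurrence of s at j ≤ n inside s ++ s is exactly a fixed rotation
theorem pvPrefix_drop_iff (s : List Char) (j : Nat) (hj : j ≤ s.length) :
    s <+: (s ++ s).drop j ↔ pvRot j s = s := by
  have h1 : (s ++ s).drop j = s.drop j ++ s := List.drop_append_of_le_length hj
  have h2 : (s.drop j ++ s).take s.length = s.drop j ++ s.take j := by
    have h3 : s.length = (s.drop j).length + j := by simp; omega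
    rw [h3, List.take_append]
    congr 1
    · exact List.take_of_length_le (by omega)
    · congr 1; omega
  rw [h1, List.prefix_iff_eq_take, h2]
  unfold pvRot
  constructor <;> intro h' <;> exact h'.symm

theorem pv_main (s : List Char) (hs : s ≠ []) :
    pvALoop s [1, 2, 3] =
      (decide (PySem.Chars.findFrom (s ++ s) s 1 none ≤ 3) &&
        (PySem.Int.mod (s.length : Int) (PySem.Chars.findFrom (s ++ s) s 1 none) == 0)) := by
  have hn : 0 < s.length := List.length_pos_iff.mpr hs
  set f := PySem.Chars.findFrom (s ++ s) s 1 none with hfdef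
  have hfk : f = PySem.Chars.findFrom (s ++ s) s ((1 : Nat) : Int) none := by
    rw [hfdef]; norm_num
  have h1len : (1 : Nat) ≤ (s ++ s).length := by simp; omega
  have hinf : s <:+: (s ++ s).drop 1 := by
    rw [List.drop_append_of_le_length (by omega)]
    exact (List.suffix_append (s.drop 1) s).isInfix
  have hne : f ≠ -1 := by
    rw [hfk]
    intro hcontr
    rw [PySem.Chars.findFrom_natCast_eq_neg_one_iff (s ++ s) s 1 h1len] at hcontr
    exact hcontr hinf
  obtain ⟨h1f, hpre, hmin⟩ :=
    PySem.Chars.findFrom_natCast_spec (s ++ s) s 1 h1len (by rw [← hfk]; exact hne)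
  rw [← hfk] at h1f hpre hmin
  have hr1 : 1 ≤ f.toNat := by omega
  have hrn : f.toNat ≤ s.length := by
    by_contra hlt
    exact hmin s.length (by omega) (by omega)
      (by rw [List.drop_left' rfl])
  have hrot : pvRot f.toNat s = s := (pvPrefix_drop_iff s f.toNat hrn).mp hpre
  have hminrot : ∀ i, 1 ≤ i → i < f.toNat → pvRot i s ≠ s := by
    intro i hi1 hir hri
    exact hmin i hi1 hir ((pvPrefix_drop_iff s i (by omega)).mpr hri)
  have hfr : f = (f.toNat : Int) := (Int.toNat_of_nonneg (by omega)).symm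
  rw [Bool.eq_iff_iff]
  simp only [Bool.and_eq_true, decide_eq_true_eq, beq_iff_eq,
    PySem.Int.mod_eq_zero_iff_dvd]
  have hA : (pvALoop s [1, 2, 3] = true) ↔
      ((s.length % 1 = 0 ∧ pvStrMul (s.take 1) (s.length / 1) = s) ∨
       (s.length % 2 = 0 ∧ pvStrMul (s.take 2) (s.length / 2) = s) ∨
       (s.length % 3 = 0 ∧ pvStrMul (s.take 3) (s.length / 3) = s)) := by
    simp only [pvALoop]
    split_ifs <;>
      first
        | exact iff_of_true rfl (by tauto)
        | exact iff_of_false (by simp) (by tauto)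
  rw [hA, hfr]
  have hcast : ((f.toNat : Int) ≤ 3 ∧ (f.toNat : Int) ∣ (s.length : Int)) ↔
      (f.toNat ≤ 3 ∧ f.toNat ∣ s.length) := by
    constructor <;> intro ⟨h1, h2⟩ <;> exact ⟨by exact_mod_cast h1, by exact_mod_cast h2⟩
  rw [hcast]
  constructor
  · rintro (⟨hd, hrep⟩ | ⟨hd, hrep⟩ | ⟨hd, hrep⟩)
    -- shared reasoning per candidate d: rotation by d fixes s, so f.toNat ≤ d
    case inl =>
      have hrotd : pvRot 1 s = s :=
        pvRot_of_rep s (s.take 1) 1 (s.length / 1) hrep.symm (by simp; omega)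
          (Nat.div_pos (by omega) (by omega))
      have hrd : f.toNat ≤ 1 := by
        by_contra hlt
        exact hminrot 1 (by omega) (by omega) hrotd
      have : f.toNat = 1 := by omega
      exact ⟨by omega, by rw [this]; exact one_dvd _⟩
    case inr.inl =>
      have hdvd : 2 ∣ s.length := Nat.dvd_of_mod_eq_zero hd
      have hdn : 2 ≤ s.length := Nat.le_of_dvd hn hdvd
      have hrotd : pvRot 2 s = s :=
        pvRot_of_rep s (s.take 2) 2 (s.length / 2) hrep.symm (by simp; omega)
          (Nat.div_pos (by omega) (by omega))
      have hrd : f.toNat ≤ 2 := by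
        by_contra hlt
        exact hminrot 2 (by omega) (by omega) hrotd
      refine ⟨by omega, ?_⟩
      interval_cases h : f.toNat
      · exact one_dvd _
      · exact hdvd
    case inr.inr =>
      have hdvd : 3 ∣ s.length := Nat.dvd_of_mod_eq_zero hd
      have hdn : 3 ≤ s.length := Nat.le_of_dvd hn hdvd
      have hrotd : pvRot 3 s = s :=
        pvRot_of_rep s (s.take 3) 3 (s.length / 3) hrep.symm (by simp; omega)
          (Nat.div_pos (by omega) (by omega))
      have hrd : f.toNat ≤ 3 := by
        by_contra hlt
        exact hminrot 3 (by omega) (by omega) hrotd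
      refine ⟨by omega, ?_⟩
      interval_cases h : f.toNat
      · exact one_dvd _
      · -- f.toNat = 2 but rotations by 2 and by 3 both fix s, hence so does rotation by 1
        exfalso
        have h12 : pvRot 1 (pvRot 2 s) = pvRot (1 + 2) s := pvRot_rot s 1 2 (by omega)
        have hrot1 : pvRot 1 s = s := by
          calc pvRot 1 s = pvRot 1 (pvRot 2 s) := by rw [hrot]
            _ = pvRot 3 s := by simpa using h12
            _ = s := hrotd
        exact hminrot 1 (by omega) (by omega) hrot1
      · exact hdvd
  · rintro ⟨hr3, hrdvd⟩
    have hrep : pvStrMul (s.take f.toNat) (s.length / f.toNat) = s :=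
      pvRep_of_rot s f.toNat (by omega) hrdvd hn hrot
    have hmod : s.length % f.toNat = 0 := by
      obtain ⟨c, hc⟩ := hrdvd; simp [hc, Nat.mul_mod_right]
    interval_cases h : f.toNat
    · exact Or.inl ⟨by omega, hrep⟩
    · exact Or.inr (Or.inl ⟨hmod, hrep⟩)
    · exact Or.inr (Or.inr ⟨hmod, hrep⟩)

-- ===== VERDICT (by name: the statement is the Claim_ definition above) =====
theorem has_short_repeat_unit_py_spec : Claim_equal_has_short_repeat_unit_py := by
  intro kmer _
  unfold Spec_has_short_repeat_unit_py has_short_repeat_unit_py has_short_repeat_unit_py_alt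
  by_cases h : kmer.toList = []
  · simp [h, pvALoop, pvStrMul]
  · simp only [List.isEmpty_iff, h]
    simpa using pv_main kmer.toList h
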